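/- GENERATED by tools/from_farm_form.py from prooffarm-gif/accepted/digest_extensions.E/Proof.lean (a worked proof of the farm's unit `digest_extensions.E`,
   accepted by the verdict) — do not edit. -/
import Gif.Spec.Units.digest_extensions_E
import Gif.Spec.AllSegs

open X86 X86.User Asan ProgX.Base ProgX.Base.Spec Gif.Spec

set_option maxRecDepth 4000
set_option maxHeartbeats 4000000

/-- Segment E of `digest_extensions` (1056F0H … the `ret` at 105701H; gif_driver.c l.144): `mov rax, rbx`, `add rsp, 8`, the six
pops, `ret`: from `Done` (the shared assertion `At` at the exit cut) to the contract's `Returned`. No protected frame: the seven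
loads (six saved registers, the return address) are given to the walker as facts, the `ret` is walked over, `Returned.mk` is filled
field by field: `post` = `ShadowUntouched` is `At.un`, `same` is `At.same` (the segment stores nothing). -/
theorem Gif.Spec.Proved.digest_extensions_E_ok : Gif.Spec.digest_extensions_E.Statement := by
  intro Lay hLay μ hμ u₀ hcode H rest frames ex e ret v hdone
  have hat := hdone.at_
  -- 1. the entry state's facts
  have he := hat.entry
  v_entry he
  -- 2. the present state (1056F0H `mov rax, rbx`)
  have w_rip := hat.rip
  have c_rsp : v.reg .rsp = e.reg .rsp - 56 := hat.rsp
  have w_eq : Mem.EqOn ProgX.Base.L.textLo ProgX.Base.L.textHi u₀.mem v.mem := ProgX.Base.conv_code_eqOn hat.code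
  have hdf : v.flags .df = false := (show abiInv _ from hat.abi).1
  have hmx : v.mxcsr &&& 0x1F80 = 0x1F80 := (show abiInv _ from hat.abi).2
  have hsse := ProgX.Base.sseOK_of_abiInv hat.abi
  have w_kept : RegsKept [.rsp] v v := RegsKept.refl _ _
  -- 3. the seven slots the epilogue loads, in the form the walker rewrites with: the six saved registers (the assertion states
  --    them as numbers) and the return address (`At.slot_ra`)
  have k_rbx : UInt64.ofNat (v.mem.readLE (e.reg .rsp - 48) 8) = e.reg .rbx := by
    rw [hat.slot_rbx, UInt64.ofNat_toNat]
  have k_rbp : UInt64.ofNat (v.mem.readLE (e.reg .rsp - 40) 8) = e.reg .rbp := by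
    rw [hat.slot_rbp, UInt64.ofNat_toNat]
  have k_r12 : UInt64.ofNat (v.mem.readLE (e.reg .rsp - 32) 8) = e.reg .r12 := by
    rw [hat.slot_r12, UInt64.ofNat_toNat]
  have k_r13 : UInt64.ofNat (v.mem.readLE (e.reg .rsp - 24) 8) = e.reg .r13 := by
    rw [hat.slot_r13, UInt64.ofNat_toNat]
  have k_r14 : UInt64.ofNat (v.mem.readLE (e.reg .rsp - 16) 8) = e.reg .r14 := by
    rw [hat.slot_r14, UInt64.ofNat_toNat]
  have k_r15 : UInt64.ofNat (v.mem.readLE (e.reg .rsp - 8) 8) = e.reg .r15 := by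
    rw [hat.slot_r15, UInt64.ofNat_toNat]
  have k_ra : UInt64.ofNat (v.mem.readLE (e.reg .rsp) 8) = ret := hat.slot_ra
  -- 4. the walk, over the `ret` at 105701H
  u_walk hcode [hμ.vendor] span [ProgX.Base.L.textLo, ProgX.Base.L.textHi] side (v_side)
  -- the `ret` has been executed
  have habi : (conv u₀).inv s_105701 := by v_inv
  refine ReachVia.done ?_
  refine X86.User.Returned.mk w_rip w_rsp ?_ ?_ (ProgX.Base.conv_code_in w_eq) habi ?_
  · -- saved: rbx, rbp, r12 … r15 popped back
    intro r hr
    cases r <;> first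
      | exact absurd hr (by decide)
      | (with_reducible assumption)
  · -- same: nothing was written since the cut
    simp only [X86.User.Spec.footprint, vspec]
    rw [w_mem]
    exact hat.same
  · -- the postcondition: no shadow byte was written (`At.un`)
    show ShadowUntouched e.mem s_105701.mem
    rw [w_mem]
    exact hat.un
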